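-- pv_equiv track=rewrite | github.com/KartopeIka/nonogram | main.py | numbers_search
-- ===== SOURCE A (Python) =====
-- def numbers_search(rows, cols, answers):
--     numbers = [[] for _ in range(rows)]
--     for row in range(rows):
--         count = 0
--         for col in range(cols):
--             if answers[row][col] != '0':
--                 count += 1
--             elif count:
--                 numbers[row].append(count)
--                 count = 0
--         if count:
--             numbers[row].append(count)
--     return numbers
-- ===== SOURCE B (Python) =====
-- def numbers_search(rows, cols, answers):
--     result = []
--     for r in range(rows):
--         bits = [answers[r][c] != '0' for c in range(cols)]
--         lengths = []
--         i = 0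
--         n = len(bits)
--         while i < n:
--             if bits[i]:
--                 j = i + 1
--                 while j < n and bits[j]:
--                     j += 1
--                 lengths.append(j - i)
--                 i = j
--             else:
--                 i += 1
--         result.append(lengths)
--     return result
-- ===== Notes on version B (the rewrite author's own statement) =====
-- stated objective: alternative
-- what changed: Replaces A's running counter flushed at each zero (and once after the loop) with run segmentation: B marks each cell as filled/empty, then scans jumping to the end of each filled run and records run lengths directly, with no carry across the final flush.
import Mathlib
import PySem

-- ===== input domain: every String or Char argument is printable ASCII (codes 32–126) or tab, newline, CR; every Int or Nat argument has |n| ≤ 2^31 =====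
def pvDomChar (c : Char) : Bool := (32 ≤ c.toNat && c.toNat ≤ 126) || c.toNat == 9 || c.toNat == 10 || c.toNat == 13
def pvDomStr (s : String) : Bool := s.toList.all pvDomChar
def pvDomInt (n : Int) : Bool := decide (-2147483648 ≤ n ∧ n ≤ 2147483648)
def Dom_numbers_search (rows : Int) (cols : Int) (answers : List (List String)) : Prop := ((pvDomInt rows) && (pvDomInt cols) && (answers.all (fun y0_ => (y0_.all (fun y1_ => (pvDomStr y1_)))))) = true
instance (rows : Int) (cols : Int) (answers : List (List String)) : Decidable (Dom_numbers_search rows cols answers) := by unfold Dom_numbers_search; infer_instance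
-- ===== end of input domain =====

-- B replaces A's running counter (flushed at each zero and once after the loop) with run
-- segmentation: mark cells filled/empty, then record the length of each maximal filled run;
-- structurally different, same cost (objective: alternative).

-- ===== PORT A =====
-- inner loop over cols with state (numbers[row] so far, count); the trailing 'if count' flush
def nsRowA (cols : Int) (cells : List String) : List Int :=
  let st := (PySem.List.pyRange 0 cols 1).foldl
    (fun (st : List Int × Int) col =>
      if PySem.List.pyGetD cells col "" ≠ "0" then (st.1, st.2 + 1)
      else if st.2 ≠ 0 then (st.1 ++ [st.2], 0)
      else st) ([], 0)
  if st.2 ≠ 0 then st.1 ++ [st.2] else st.1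

def numbers_search (rows : Int) (cols : Int) (answers : List (List String)) : List (List Int) :=
  (PySem.List.pyRange 0 rows 1).foldl
    (fun numbers row => numbers ++ [nsRowA cols (PySem.List.pyGetD answers row [])]) []

-- ===== PORT B =====
-- bits = [answers[r][c] != '0' for c in range(cols)]
def nsBits (cols : Int) (cells : List String) : List Bool :=
  (PySem.List.pyRange 0 cols 1).map (fun c => PySem.List.pyGetD cells c "" != "0")

-- the two while loops: skip an empty cell, or jump to the end of the filled run and record its length
def nsRuns : List Bool → List Int
  | [] => []
  | false :: t => nsRuns t
  | true :: t => (((t.takeWhile id).length : Int) + 1) :: nsRuns (t.dropWhile id)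
termination_by l => l.length
decreasing_by
  · simp
  · exact Nat.lt_succ_of_le (t.length_dropWhile_le id)

def numbers_search_alt (rows : Int) (cols : Int) (answers : List (List String)) : List (List Int) :=
  (PySem.List.pyRange 0 rows 1).map (fun r => nsRuns (nsBits cols (PySem.List.pyGetD answers r [])))

-- ===== PRECONDITION & SPEC =====
-- Pre_ excludes exactly the inputs where Python A raises IndexError: with cols > 0 it indexes
-- answers[row][col] for every row in range(rows) and col in range(cols); with cols ≤ 0 nothing is indexed.
def Pre_numbers_search (rows : Int) (cols : Int) (answers : List (List String)) : Prop :=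
  cols ≤ 0 ∨ (rows ≤ answers.length ∧ ∀ r ∈ answers.take rows.toNat, cols ≤ (r.length : Int))
instance (rows : Int) (cols : Int) (answers : List (List String)) : Decidable (Pre_numbers_search rows cols answers) := by unfold Pre_numbers_search; infer_instance
def pvWitness_numbers_search : Int × Int × List (List String) := (2, 2, [["1", "0"], ["0", "1"]])

def Spec_numbers_search (rows : Int) (cols : Int) (answers : List (List String)) (out : List (List Int)) : Prop := out = numbers_search_alt rows cols answers
instance (rows : Int) (cols : Int) (answers : List (List String)) (out : List (List Int)) : Decidable (Spec_numbers_search rows cols answers out) := by unfold Spec_numbers_search; infer_instance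

-- ===== CLAIM (what is proved, stated in full; the proofs are below) =====
def Claim_equal_numbers_search : Prop := ∀ (rows : Int) (cols : Int) (answers : List (List String)), Dom_numbers_search rows cols answers → Pre_numbers_search rows cols answers → Spec_numbers_search rows cols answers (numbers_search rows cols answers)

-- ===== LEMMAS AND PROOFS =====

-- A's counter step, expressed on the sequence of filled/empty marks
def nsStep (st : List Int × Int) (b : Bool) : List Int × Int :=
  if b then (st.1, st.2 + 1)
  else if st.2 ≠ 0 then (st.1 ++ [st.2], 0)
  else st

def nsFlush (st : List Int × Int) : List Int :=
  if st.2 ≠ 0 then st.1 ++ [st.2] else st.1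

-- invariant of A's inner loop: flushing the counter fold equals run segmentation,
-- with a nonnegative carry cnt merging into the first run
lemma nsFold_eq_runs (bits : List Bool) : ∀ (acc : List Int) (cnt : Int), 0 ≤ cnt →
    nsFlush (bits.foldl nsStep (acc, cnt)) =
      if cnt = 0 then acc ++ nsRuns bits
      else acc ++ ((cnt + ((bits.takeWhile id).length : Int)) :: nsRuns (bits.dropWhile id)) := by
  induction bits with
  | nil =>
    intro acc cnt _
    by_cases h : cnt = 0 <;> simp [nsFlush, nsRuns, h]
  | cons b t ih =>
    intro acc cnt hcnt
    cases b with
    | true =>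
      have hstep : nsStep (acc, cnt) true = (acc, cnt + 1) := by simp [nsStep]
      rw [List.foldl_cons, hstep, ih acc (cnt + 1) (by omega)]
      have h2 : cnt + 1 ≠ 0 := by omega
      rw [if_neg h2]
      by_cases h : cnt = 0
      · subst h
        rw [if_pos rfl]
        simp [nsRuns]
        omega
      · rw [if_neg h]
        simp [List.takeWhile, List.dropWhile]
        omega
    | false =>
      by_cases h : cnt = 0
      · subst h
        have hstep : nsStep (acc, 0) false = (acc, 0) := by simp [nsStep]
        rw [List.foldl_cons, hstep, ih acc 0 le_rfl]
        simp [nsRuns]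
      · have hstep : nsStep (acc, cnt) false = (acc ++ [cnt], 0) := by simp [nsStep, h]
        rw [List.foldl_cons, hstep, ih (acc ++ [cnt]) 0 le_rfl]
        simp [nsRuns, List.takeWhile, List.dropWhile, h]

-- A's row equals B's row
lemma nsRowA_eq (cols : Int) (cells : List String) :
    nsRowA cols cells = nsRuns (nsBits cols cells) := by
  have hmap : (PySem.List.pyRange 0 cols 1).foldl
      (fun (st : List Int × Int) col =>
        if PySem.List.pyGetD cells col "" ≠ "0" then (st.1, st.2 + 1)
        else if st.2 ≠ 0 then (st.1 ++ [st.2], 0)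
        else st) ([], 0)
      = (nsBits cols cells).foldl nsStep ([], 0) := by
    rw [nsBits, List.foldl_map]
    congr 1
    funext st c
    by_cases h : PySem.List.pyGetD cells c "" = "0" <;> simp [nsStep, h]
  have h0 := nsFold_eq_runs (nsBits cols cells) [] 0 le_rfl
  rw [if_pos rfl, List.nil_append] at h0
  rw [nsRowA, hmap]
  exact h0

theorem numbers_search_eq_alt (rows cols : Int) (answers : List (List String)) :
    numbers_search rows cols answers = numbers_search_alt rows cols answers := by
  rw [numbers_search, numbers_search_alt,
    PySem.List.foldl_append_singleton_eq_map]
  exact List.map_congr_left (fun r _ => nsRowA_eq cols (PySem.List.pyGetD answers r []))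

-- ===== VERDICT (by name: the statement is the Claim_ definition above) =====
theorem numbers_search_spec : Claim_equal_numbers_search := by
  intro rows cols answers _ _
  exact numbers_search_eq_alt rows cols answers
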